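-- pv_equiv track=rewrite | github.com/RobbeW/Data_Statistiek_R | Deel 3 Algoritmiek/04 Gretige algoritmen/07 Maak het stijgend/solution/solution.nl.py | minimale_toevoegingen
-- ===== SOURCE A (Python) =====
-- def minimale_toevoegingen(getallen):
--     aantal = 0
--     for i in range(1, len(getallen)):
--         if getallen[i - 1] >= getallen[i]:
--             verschil = getallen[i - 1] - getallen[i]
--             aantal += verschil + 1
--             getallen[i] = getallen[i - 1] + 1
--
--     return aantal
-- ===== SOURCE B (Python) =====
-- def prefix_maxima(l):
--     # divide and conquer: prefix maxima of the left half, of the right half,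
--     # then fold the left half's overall maximum into the right half
--     if len(l) <= 1:
--         return l[:]
--     midden = len(l) // 2
--     links = prefix_maxima(l[:midden])
--     rechts = prefix_maxima(l[midden:])
--     grootste = links[-1]
--     return links + [max(grootste, v) for v in rechts]
--
-- def minimale_toevoegingen(getallen):
--     # closed form: the corrected value e[i] is (max over j <= i of getallen[j] - j) + i,
--     # so compute prefix maxima of the index-shifted values by divide and conquer
--     verschoven = [x - j for j, x in enumerate(getallen)]
--     e = [p + i for i, p in enumerate(prefix_maxima(verschoven))]
--     totaal = sum(e) - sum(getallen)
--     getallen[:] = e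
--     return totaal
-- ===== Notes on version B (the rewrite author's own statement) =====
-- stated objective: alternative
-- what changed: Replaces A's greedy compare-and-bump loop with a closed form: the corrected value at i is (max over j<=i of getallen[j]-j)+i, computed via divide-and-conquer prefix maxima of the index-shifted values; the count is sum(e)-sum(getallen).
import Mathlib
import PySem

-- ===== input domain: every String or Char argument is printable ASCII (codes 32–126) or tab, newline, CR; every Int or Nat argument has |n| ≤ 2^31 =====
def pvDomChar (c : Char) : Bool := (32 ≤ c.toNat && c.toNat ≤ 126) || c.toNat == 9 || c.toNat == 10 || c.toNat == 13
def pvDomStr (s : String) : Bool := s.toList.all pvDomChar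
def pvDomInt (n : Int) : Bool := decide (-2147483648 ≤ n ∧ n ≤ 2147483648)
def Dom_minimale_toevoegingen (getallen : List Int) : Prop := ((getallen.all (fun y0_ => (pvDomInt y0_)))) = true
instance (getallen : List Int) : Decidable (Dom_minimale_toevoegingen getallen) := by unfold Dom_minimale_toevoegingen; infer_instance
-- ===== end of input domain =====

-- B replaces A's greedy loop with divide-and-conquer prefix maxima of the index-shifted values (e[i] = max_{j<=i}(a[j]-j) + i); equivalence is about the RETURN value only (both Pythons mutate getallen identically).

-- ===== PORT A =====
-- the loop body of A (indices i in range(1, len) are always in range, so pyGetD's default 0 is never used)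
def pvStepA (st : List Int × Int) (i : Int) : List Int × Int :=
  let xs := st.1
  let aantal := st.2
  if PySem.List.pyGetD xs (i - 1) 0 ≥ PySem.List.pyGetD xs i 0 then
    let verschil := PySem.List.pyGetD xs (i - 1) 0 - PySem.List.pyGetD xs i 0
    (xs.set i.toNat (PySem.List.pyGetD xs (i - 1) 0 + 1), aantal + (verschil + 1))
  else (xs, aantal)

def minimale_toevoegingen (getallen : List Int) : Int :=
  ((PySem.List.pyRange 1 getallen.length 1).foldl pvStepA (getallen, 0)).2

-- ===== PORT B =====
-- prefix_maxima: divide and conquer (l[:] returns a copy, ported as l itself;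
-- links[-1] is ported with pyGetD whose default is never used: links is nonempty there)
def pvPrefixMaxima (l : List Int) : List Int :=
  if _h : l.length ≤ 1 then l
  else
    let midden : Int := PySem.Int.floordiv (l.length : Int) 2
    let links := pvPrefixMaxima (PySem.List.slice l none (some midden))
    let rechts := pvPrefixMaxima (PySem.List.slice l (some midden) none)
    let grootste := PySem.List.pyGetD links (-1) 0
    links ++ rechts.map (fun v => max grootste v)
termination_by l.length
decreasing_by
  · have hm : PySem.Int.floordiv ((l.length : Int)) 2 = ((l.length / 2 : Nat) : Int) := by
      exact_mod_cast PySem.Int.floordiv_natCast l.length 2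
    rw [hm, PySem.List.slice_to_natCast]
    simp only [List.length_take]
    omega
  · have hm : PySem.Int.floordiv ((l.length : Int)) 2 = ((l.length / 2 : Nat) : Int) := by
      exact_mod_cast PySem.Int.floordiv_natCast l.length 2
    rw [hm, PySem.List.slice_from_natCast]
    simp only [List.length_drop]
    omega

def minimale_toevoegingen_alt (getallen : List Int) : Int :=
  let verschoven := (PySem.List.enumerate getallen 0).map (fun jx => jx.2 - jx.1)
  let e := (PySem.List.enumerate (pvPrefixMaxima verschoven) 0).map (fun ip => ip.2 + ip.1)
  e.foldl (· + ·) 0 - getallen.foldl (· + ·) 0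

-- ===== PRECONDITION & SPEC =====
def Spec_minimale_toevoegingen (getallen : List Int) (out : Int) : Prop := out = minimale_toevoegingen_alt getallen
instance (getallen : List Int) (out : Int) : Decidable (Spec_minimale_toevoegingen getallen out) := by unfold Spec_minimale_toevoegingen; infer_instance

-- ===== CLAIM (what is proved, stated in full; the proofs are below) =====
def Claim_equal_minimale_toevoegingen : Prop := ∀ (getallen : List Int), Dom_minimale_toevoegingen getallen → Spec_minimale_toevoegingen getallen (minimale_toevoegingen getallen)

-- ===== LEMMAS AND PROOFS =====

-- the common reference value: total additions for the tail whose previous corrected value is p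
def pvGo (p : Int) : List Int → Int
  | [] => 0
  | x :: xs => (max x (p + 1) - x) + pvGo (max x (p + 1)) xs

-- the corrected sequence as A's recurrence produces it
def pvAccum (p : Int) : List Int → List Int
  | [] => [p]
  | x :: xs => p :: pvAccum (max x (p + 1)) xs

-- ===== A-side =====
theorem pvA_lemma (t : List Int) : ∀ (pre : List Int) (p a : Int),
    (PySem.List.pyRange (pre.length + 1) (pre.length + 1 + t.length) 1).foldl
      pvStepA (pre ++ p :: t, a)
    = (pre ++ pvAccum p t, a + pvGo p t) := by
  induction t with
  | nil =>
      intro pre p a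
      rw [PySem.List.pyRange_one_eq_nil (by simp)]
      simp [pvAccum, pvGo]
  | cons x xs ih =>
      intro pre p a
      rw [PySem.List.pyRange_one_cons (by push_cast [List.length_cons]; omega)]
      rw [List.foldl_cons]
      have hidx : ((pre.length : Int) + 1) - 1 = ((pre.length : Nat) : Int) := by ring
      have h1 : PySem.List.pyGetD (pre ++ p :: x :: xs) (((pre.length : Int) + 1) - 1) 0 = p := by
        rw [hidx, PySem.List.pyGetD_natCast]
        simp
      have h2 : PySem.List.pyGetD (pre ++ p :: x :: xs) ((pre.length : Int) + 1) 0 = x := by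
        have : ((pre.length : Int) + 1) = ((pre.length + 1 : Nat) : Int) := by push_cast; ring
        rw [this, PySem.List.pyGetD_natCast]
        simp
      have htn : ((pre.length : Int) + 1).toNat = pre.length + 1 := by omega
      have hset : (pre ++ p :: x :: xs).set (pre.length + 1) (p + 1)
          = (pre ++ [p]) ++ (p + 1) :: xs := by
        simp [List.set_cons_succ]
      have hr : (pre.length : Int) + 1 + 1 = (((pre ++ [p]).length : Nat) : Int) + 1 := by
        simp
      have hr2 : (pre.length : Int) + 1 + (((x :: xs).length : Nat) : Int)
          = (((pre ++ [p]).length : Nat) : Int) + 1 + ((xs.length : Nat) : Int) := by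
        simp; ring
      by_cases hpx : p ≥ x
      · simp only [pvStepA, h1, h2, htn, if_pos hpx, hset]
        rw [hr, hr2, ih (pre ++ [p]) (p + 1) (a + (p - x + 1))]
        have hmax : max x (p + 1) = p + 1 := by omega
        simp only [pvAccum, pvGo, hmax, List.append_assoc, List.singleton_append,
          Prod.mk.injEq]
        exact ⟨trivial, by ring⟩
      · simp only [pvStepA, h1, h2, if_neg hpx]
        have hl : pre ++ p :: x :: xs = (pre ++ [p]) ++ x :: xs := by simp
        rw [hr, hr2, hl, ih (pre ++ [p]) x a]
        have hmax : max x (p + 1) = x := by omega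
        simp only [pvAccum, pvGo, hmax, List.append_assoc, List.singleton_append,
          Prod.mk.injEq]
        exact ⟨trivial, by ring⟩

-- ===== B-side =====
-- reference prefix-maxima: running scan (pvGold) that pvPrefixMaxima is proved equal to
def pvScan (m : Int) : List Int → List Int
  | [] => [m]
  | x :: xs => m :: pvScan (max m x) xs

def pvGold : List Int → List Int
  | [] => []
  | x :: xs => pvScan x xs

theorem pvScan_ne_nil (m : Int) (u : List Int) : pvScan m u ≠ [] := by
  cases u <;> simp [pvScan]

theorem pvScan_length (u : List Int) : ∀ m, (pvScan m u).length = u.length + 1 := by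
  induction u with
  | nil => intro m; simp [pvScan]
  | cons x xs ih => intro m; simp [pvScan, ih]

theorem pvScan_map (u : List Int) : ∀ (c m : Int),
    (pvScan m u).map (fun x => max c x) = pvScan (max c m) u := by
  induction u with
  | nil => intro c m; simp [pvScan]
  | cons x xs ih => intro c m; simp [pvScan, ih, max_assoc]

theorem pvScan_append (u : List Int) : ∀ (m : Int) (v : List Int),
    pvScan m (u ++ v) = pvScan m u ++ (pvGold v).map (fun x => max (u.foldl max m) x) := by
  induction u with
  | nil =>
      intro m v
      cases v with
      | nil => simp [pvScan, pvGold]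
      | cons y v' => simp [pvScan, pvGold, pvScan_map]
  | cons z u' ih =>
      intro m v
      simp [pvScan, ih, List.foldl_cons]

theorem pvScan_last (u : List Int) : ∀ m, PySem.List.pyGetD (pvScan m u) (-1) 0 = u.foldl max m := by
  induction u with
  | nil =>
      intro m
      simpa using PySem.List.pyGetD_neg_one_append_singleton ([] : List Int) m 0
  | cons x xs ih =>
      intro m
      have hne : pvScan (max m x) xs ≠ [] := pvScan_ne_nil _ _
      rw [show pvScan m (x :: xs) = m :: pvScan (max m x) xs from rfl]
      have h1 := PySem.List.pyGetD_neg_one (xs := m :: pvScan (max m x) xs) (d := 0) (by simp)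
      have h2 := PySem.List.pyGetD_neg_one (xs := pvScan (max m x) xs) (d := 0) hne
      rw [h1, List.getLast_cons hne, ← h2, ih]
      rfl

theorem pvPM_eq_aux (n : Nat) : ∀ (l : List Int), l.length ≤ n → pvPrefixMaxima l = pvGold l := by
  induction n with
  | zero =>
      intro l hl
      have : l = [] := List.eq_nil_of_length_eq_zero (by omega)
      subst this
      rw [pvPrefixMaxima]
      simp [pvGold]
  | succ k ih =>
      intro l hl
      rw [pvPrefixMaxima]
      by_cases h1 : l.length ≤ 1
      · rw [dif_pos h1]
        match l, h1 with
        | [], _ => simp [pvGold]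
        | [x], _ => simp [pvGold, pvScan]
      · rw [dif_neg h1]
        have hm : PySem.Int.floordiv ((l.length : Int)) 2 = ((l.length / 2 : Nat) : Int) := by
          exact_mod_cast PySem.Int.floordiv_natCast l.length 2
        simp only [hm, PySem.List.slice_to_natCast, PySem.List.slice_from_natCast]
        have hlen : 2 ≤ l.length := by omega
        have hmid : 1 ≤ l.length / 2 ∧ l.length / 2 < l.length := by omega
        rw [ih (l.take (l.length / 2)) (by simp; omega),
            ih (l.drop (l.length / 2)) (by simp; omega)]
        -- take is nonempty: expose its head
        obtain ⟨a, rest, hl'⟩ : ∃ a rest, l = a :: rest := by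
          cases l with
          | nil => simp at hlen
          | cons a rest => exact ⟨a, rest, rfl⟩
        subst hl'
        rw [show (a :: rest).take ((a :: rest).length / 2)
            = a :: rest.take ((a :: rest).length / 2 - 1) by
          cases hn : (a :: rest).length / 2 with
          | zero => omega
          | succ j => simp [List.take_succ_cons]]
        conv_rhs => rw [show (a :: rest)
            = (a :: rest.take ((a :: rest).length / 2 - 1)) ++ (a :: rest).drop ((a :: rest).length / 2) by
          rw [show a :: rest.take ((a :: rest).length / 2 - 1)
              = (a :: rest).take ((a :: rest).length / 2) by
            cases hn : (a :: rest).length / 2 with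
            | zero => omega
            | succ j => simp [List.take_succ_cons]]
          exact (List.take_append_drop _ _).symm]
        rw [show pvGold ((a :: rest.take ((a :: rest).length / 2 - 1)) ++ (a :: rest).drop ((a :: rest).length / 2))
            = pvScan a (rest.take ((a :: rest).length / 2 - 1) ++ (a :: rest).drop ((a :: rest).length / 2)) from by
          simp [pvGold]]
        rw [pvScan_append]
        rw [show pvGold (a :: rest.take ((a :: rest).length / 2 - 1))
            = pvScan a (rest.take ((a :: rest).length / 2 - 1)) from rfl]
        rw [pvScan_last]

theorem pvPM_eq (l : List Int) : pvPrefixMaxima l = pvGold l := pvPM_eq_aux l.length l le_rfl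

theorem pvScan_getD_zero (m : Int) (u : List Int) : (pvScan m u).getD 0 0 = m := by
  cases u <;> simp [pvScan]

theorem pvScan_getD_succ (u : List Int) : ∀ (i : Nat) (m : Int), i < u.length →
    (pvScan m u).getD (i + 1) 0 = max ((pvScan m u).getD i 0) (u.getD i 0) := by
  induction u with
  | nil => intro i m h; simp at h
  | cons x xs ih =>
      intro i m h
      cases i with
      | zero =>
          simp only [pvScan, List.getD_cons_succ, List.getD_cons_zero]
          rw [pvScan_getD_zero]
      | succ k =>
          simp only [pvScan, List.getD_cons_succ]
          exact ih k (max m x) (by simpa using h)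

theorem pvGold_length (l : List Int) : (pvGold l).length = l.length := by
  cases l <;> simp [pvGold, pvScan_length]

theorem pvGold_getD_zero (l : List Int) (h : l ≠ []) : (pvGold l).getD 0 0 = l.getD 0 0 := by
  cases l with
  | nil => simp at h
  | cons x xs =>
      rw [show pvGold (x :: xs) = pvScan x xs from rfl, pvScan_getD_zero]
      rfl

theorem pvGold_getD_succ (l : List Int) (i : Nat) (h : i + 1 < l.length) :
    (pvGold l).getD (i + 1) 0 = max ((pvGold l).getD i 0) (l.getD (i + 1) 0) := by
  cases l with
  | nil => simp at h
  | cons x xs =>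
      simp only [pvGold, List.getD_cons_succ]
      exact pvScan_getD_succ xs i x (by simpa using h)

theorem pv_enum_map (f : Int × Int → Int) (l : List Int) : ∀ (s : Int) (i : Nat), i < l.length →
    ((PySem.List.enumerate l s).map f).getD i 0 = f (s + (i : Int), l.getD i 0) := by
  induction l with
  | nil => intro s i h; simp at h
  | cons x xs ih =>
      intro s i h
      rw [PySem.List.enumerate_cons]
      cases i with
      | zero => simp
      | succ k =>
          simp only [List.map_cons, List.getD_cons_succ]
          rw [ih (s + 1) k (by simpa using h)]
          congr 2
          push_cast
          ring

theorem pvAccum_length (l : List Int) : ∀ p, (pvAccum p l).length = l.length + 1 := by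
  induction l with
  | nil => intro p; simp [pvAccum]
  | cons x xs ih => intro p; simp [pvAccum, ih]

theorem pvAccum_getD_zero (p : Int) (l : List Int) : (pvAccum p l).getD 0 0 = p := by
  cases l <;> simp [pvAccum]

theorem pvAccum_getD_succ (l : List Int) : ∀ (i : Nat) (p : Int), i < l.length →
    (pvAccum p l).getD (i + 1) 0 = max ((pvAccum p l).getD i 0 + 1) (l.getD i 0) := by
  induction l with
  | nil => intro i p h; simp at h
  | cons x xs ih =>
      intro i p h
      cases i with
      | zero =>
          simp only [pvAccum, List.getD_cons_succ, List.getD_cons_zero]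
          rw [pvAccum_getD_zero]
          omega
      | succ k =>
          simp only [pvAccum, List.getD_cons_succ]
          exact ih k (max x (p + 1)) (by simpa using h)

theorem pv_foldl_add_eq_sum (l : List Int) : ∀ (a : Int), l.foldl (· + ·) a = a + l.sum := by
  induction l with
  | nil => intro a; simp
  | cons x xs ih => intro a; simp only [List.foldl_cons, List.sum_cons, ih]; ring

theorem pv_sum_accum (l : List Int) : ∀ (p : Int),
    (pvAccum p l).sum = pvGo p l + (p :: l).sum := by
  induction l with
  | nil => intro p; simp [pvAccum, pvGo]
  | cons x xs ih =>
      intro p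
      simp only [pvAccum, pvGo, List.sum_cons, ih (max x (p + 1))]
      ring_nf

theorem pv_e_eq (h : Int) (t : List Int) :
    ((PySem.List.enumerate
        (pvGold ((PySem.List.enumerate (h :: t) 0).map (fun jx => jx.2 - jx.1))) 0).map
      (fun ip => ip.2 + ip.1)) = pvAccum h t := by
  set v := (PySem.List.enumerate (h :: t) 0).map (fun jx => jx.2 - jx.1) with hv_def
  have hvlen : v.length = t.length + 1 := by simp [hv_def]
  have hglen : (pvGold v).length = t.length + 1 := by rw [pvGold_length, hvlen]
  have hv : ∀ i : Nat, i < t.length + 1 → v.getD i 0 = (h :: t).getD i 0 - (i : Int) := by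
    intro i hi
    rw [hv_def, pv_enum_map _ _ 0 i (by simpa using hi)]
    simp
  have he : ∀ i : Nat, i < t.length + 1 →
      ((PySem.List.enumerate (pvGold v) 0).map (fun ip => ip.2 + ip.1)).getD i 0
        = (pvGold v).getD i 0 + (i : Int) := by
    intro i hi
    rw [pv_enum_map _ _ 0 i (by omega)]
    simp [add_comm]
  have hpt : ∀ i : Nat, i < t.length + 1 →
      ((PySem.List.enumerate (pvGold v) 0).map (fun ip => ip.2 + ip.1)).getD i 0
        = (pvAccum h t).getD i 0 := by
    intro i
    induction i with
    | zero =>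
        intro hi
        rw [he 0 hi, pvGold_getD_zero v (by intro hnil; rw [hnil] at hvlen; simp at hvlen),
          hv 0 hi, pvAccum_getD_zero]
        simp
    | succ k ih =>
        intro hk
        rw [he (k + 1) hk, pvGold_getD_succ v k (by omega), hv (k + 1) hk,
          pvAccum_getD_succ t k h (by omega), ← ih (by omega), he k (by omega)]
        have ht : (h :: t).getD (k + 1) 0 = t.getD k 0 := rfl
        rw [ht]
        push_cast
        omega
  apply List.ext_getElem
  · rw [pvAccum_length]
    simp [hglen]
  · intro i h1 h2
    have hi : i < t.length + 1 := by rw [pvAccum_length] at h2; exact h2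
    rw [← List.getD_eq_getElem _ 0 h1, ← List.getD_eq_getElem _ 0 h2]
    exact hpt i hi

-- ===== VERDICT (by name: the statement is the Claim_ definition above) =====
theorem minimale_toevoegingen_spec : Claim_equal_minimale_toevoegingen := by
  intro getallen _
  unfold Spec_minimale_toevoegingen
  cases getallen with
  | nil =>
      show (List.foldl pvStepA ([], 0) (PySem.List.pyRange 1 (List.length ([] : List Int)) 1)).2
          = ((PySem.List.enumerate
              (pvPrefixMaxima ((PySem.List.enumerate ([] : List Int) 0).map
                (fun jx => jx.2 - jx.1))) 0).map (fun ip => ip.2 + ip.1)).foldl (· + ·) 0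
            - ([] : List Int).foldl (· + ·) 0
      rw [pvPM_eq]
      rfl
  | cons h t =>
      show (List.foldl pvStepA (h :: t, 0) (PySem.List.pyRange 1 ((h :: t).length) 1)).2
          = ((PySem.List.enumerate
              (pvPrefixMaxima ((PySem.List.enumerate (h :: t) 0).map
                (fun jx => jx.2 - jx.1))) 0).map (fun ip => ip.2 + ip.1)).foldl (· + ·) 0
            - (h :: t).foldl (· + ·) 0
      rw [pvPM_eq, pv_e_eq]
      have hA := pvA_lemma t [] h 0
      simp only [List.length_nil, Nat.cast_zero, zero_add, List.nil_append] at hA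
      have hlen : (((h :: t).length : Nat) : Int) = 1 + (t.length : Int) := by
        push_cast [List.length_cons]; ring
      rw [hlen, hA, pv_foldl_add_eq_sum, pv_foldl_add_eq_sum, pv_sum_accum]
      simp only [List.sum_cons, zero_add]
      ring
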